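-- pv_equiv track=rewrite | github.com/ottoesp/logicgatediagramgenerator | diagramapp/diagramGenerator/topo.py | get_incoming_neighbour_positions
-- ===== SOURCE A (Python) =====
-- def get_edges(node: str, edges: set[tuple[str, str]], incoming = False):
--     matches = list()
--     for edge in edges:
--         if edge[1 if incoming else 0] == node:
--             matches.append(edge)
--     return matches
--
-- def get_incoming_neighbour_positions(node: str, ordered_nodes: list[str], edges: set[tuple[str, str]])->list[int]:
--     incoming_neighbours = set(map(lambda edge: edge[0], get_edges(node, edges, True)))
--     positions = list()
--     if len(incoming_neighbours) <= 0:
--         return positions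
--
--     for i, n in enumerate(ordered_nodes):
--         if n in incoming_neighbours:
--             positions.append(i)
--
--     positions.reverse()  # In descending order
--     return positions
-- ===== SOURCE B (Python) =====
-- def get_incoming_neighbour_positions(node, ordered_nodes, edges):
--     index = {}
--     for i, name in enumerate(ordered_nodes):
--         index.setdefault(name, []).append(i)
--     nbrs = {src for src, dst in edges if dst == node}
--     out = []
--     for nb in nbrs:
--         out += index.get(nb, [])
--     return sorted(out, reverse=True)
-- ===== Notes on version B (the rewrite author's own statement) =====
-- stated objective: alternative
-- what changed: B builds a name-to-index-list table once and a neighbour set by a direct comprehension, then collects the neighbours' positions from the table and sorts them descending, instead of A's helper-based edge scan followed by a forward membership-test scan over ordered_nodes plus an in-place reverse.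
import Mathlib
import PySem

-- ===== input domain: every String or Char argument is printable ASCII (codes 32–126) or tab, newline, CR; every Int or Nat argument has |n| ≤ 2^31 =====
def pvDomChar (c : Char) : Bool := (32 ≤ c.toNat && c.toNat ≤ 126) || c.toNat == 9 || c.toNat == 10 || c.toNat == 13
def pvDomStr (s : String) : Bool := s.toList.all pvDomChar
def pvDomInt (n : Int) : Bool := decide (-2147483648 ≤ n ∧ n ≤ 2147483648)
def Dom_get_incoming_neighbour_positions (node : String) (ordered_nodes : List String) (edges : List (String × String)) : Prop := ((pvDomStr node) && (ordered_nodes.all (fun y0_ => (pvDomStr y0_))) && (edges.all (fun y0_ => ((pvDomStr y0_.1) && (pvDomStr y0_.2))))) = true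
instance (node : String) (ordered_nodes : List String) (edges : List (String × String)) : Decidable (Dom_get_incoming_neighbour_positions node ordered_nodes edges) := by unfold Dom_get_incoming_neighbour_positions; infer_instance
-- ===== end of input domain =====

-- B replaces A's helper-based edge scan + forward membership scan + in-place reverse by a
-- name→indices table, a neighbour-set comprehension and a descending sort (objective: alternative).

-- ===== PORT A =====
def get_edges (node : String) (edges : List (String × String)) (incoming : Bool) : List (String × String) :=
  edges.foldl (fun ms edge =>
    if (if incoming then edge.2 else edge.1) == node then ms ++ [edge] else ms) []

def get_incoming_neighbour_positions (node : String) (ordered_nodes : List String) (edges : List (String × String)) : List Int :=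
  let incoming_neighbours : PySem.Set String :=
    PySem.Set.ofList ((get_edges node edges true).map (fun edge => edge.1))
  let positions : List Int := []
  if incoming_neighbours.length ≤ 0 then positions
  else
    let positions := (PySem.List.enumerate ordered_nodes).foldl
      (fun acc p => if incoming_neighbours.contains p.2 then acc ++ [p.1] else acc) positions
    positions.reverse

-- ===== PORT B =====
def get_incoming_neighbour_positions_alt (node : String) (ordered_nodes : List String) (edges : List (String × String)) : List Int :=
  let index : PySem.Dict String (List Int) :=
    (PySem.List.enumerate ordered_nodes).foldl
      (fun d p => d.modify p.2 ([] : List Int) (fun v => v ++ [p.1])) PySem.Dict.empty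
  let nbrs : PySem.Set String :=
    PySem.Set.ofList ((edges.filter (fun e => e.2 == node)).map (fun e => e.1))
  let out : List Int := nbrs.foldl (fun acc nb => acc ++ index.getD nb []) []
  PySem.List.sorted out (fun x => x) true

-- ===== PRECONDITION & SPEC =====
def Spec_get_incoming_neighbour_positions (node : String) (ordered_nodes : List String) (edges : List (String × String)) (out : List Int) : Prop := out = get_incoming_neighbour_positions_alt node ordered_nodes edges
instance (node : String) (ordered_nodes : List String) (edges : List (String × String)) (out : List Int) : Decidable (Spec_get_incoming_neighbour_positions node ordered_nodes edges out) := by unfold Spec_get_incoming_neighbour_positions; infer_instance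

-- ===== CLAIM (what is proved, stated in full; the proofs are below) =====
def Claim_equal_get_incoming_neighbour_positions : Prop := ∀ (node : String) (ordered_nodes : List String) (edges : List (String × String)), Dom_get_incoming_neighbour_positions node ordered_nodes edges → Spec_get_incoming_neighbour_positions node ordered_nodes edges (get_incoming_neighbour_positions node ordered_nodes edges)

-- ===== LEMMAS AND PROOFS =====

-- concatenating two filters by disjoint tests is a permutation of the filter by their disjunction
theorem pv_filter_or_perm {α : Type} (p q : α → Bool) (l : List α)
    (hdisj : ∀ x ∈ l, ¬(p x = true ∧ q x = true)) :
    (l.filter p ++ l.filter q).Perm (l.filter (fun x => p x || q x)) := by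
  induction l with
  | nil => simp
  | cons h t ih =>
      have ih' := ih (fun x hx => hdisj x (List.mem_cons_of_mem _ hx))
      cases hp : p h <;> cases hq : q h
      · simp only [List.filter_cons, hp, hq, Bool.or_self, Bool.false_eq_true, if_false]
        exact ih'
      · simp only [List.filter_cons, hp, hq, Bool.false_or, Bool.false_eq_true, if_false, if_true]
        exact List.perm_middle.trans (ih'.cons h)
      · simp only [List.filter_cons, hp, hq, Bool.true_or, Bool.false_eq_true, if_false, if_true,
          List.cons_append]
        exact ih'.cons h
      · exact absurd ⟨hp, hq⟩ (hdisj h List.mem_cons_self)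

-- collecting the per-name index lists over a duplicate-free name list is a permutation
-- of the single scan filtered by membership
theorem pv_flatMap_perm (l : List (Int × String)) (s : List String) (hs : s.Nodup) :
    (s.flatMap (fun nb => (l.filter (fun p => p.2 == nb)).map (fun p => p.1))).Perm
      ((l.filter (fun p => s.contains p.2)).map (fun p => p.1)) := by
  induction s with
  | nil => simp
  | cons nb s' ih =>
      have hnb : nb ∉ s' := (List.nodup_cons.mp hs).1
      have ih' := ih (List.nodup_cons.mp hs).2
      simp only [List.flatMap_cons]
      refine ((List.Perm.append_left _ ih').trans ?_)
      rw [← List.map_append]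
      have hd : ∀ x ∈ l, ¬((x.2 == nb) = true ∧ (s'.contains x.2) = true) := by
        intro x _ hc
        obtain ⟨h1, h2⟩ := hc
        have : x.2 = nb := by simpa using h1
        subst this
        exact hnb (by simpa using h2)
      refine (List.Perm.map _ (pv_filter_or_perm (fun p => p.2 == nb) (fun p => s'.contains p.2) l hd)).trans ?_
      apply List.Perm.of_eq
      have hfun : (fun (x : Int × String) => x.2 == nb || s'.contains x.2) =
          (fun (x : Int × String) => (nb :: s').contains x.2) := by
        funext x; by_cases h : x.2 = nb <;> simp [h]
      rw [hfun]

-- the group-by loop: looking up c in the table built over l gives exactly the first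
-- components of l's pairs whose second component is c, in order
theorem pv_getD_group (l : List (Int × String)) (d : PySem.Dict String (List Int)) (c : String) :
    (l.foldl (fun d p => d.modify p.2 ([] : List Int) (fun v => v ++ [p.1])) d).getD c [] =
      d.getD c [] ++ (l.filter (fun p => p.2 == c)).map (fun p => p.1) := by
  induction l generalizing d with
  | nil => simp
  | cons h t ih =>
      simp only [List.foldl_cons, List.filter_cons]
      rw [ih]
      by_cases hc : h.2 = c
      · simp [hc]
      · simp [PySem.Dict.getD_modify, hc, Ne.symm hc]

theorem pv_main_eq (node : String) (ordered_nodes : List String) (edges : List (String × String)) :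
    get_incoming_neighbour_positions node ordered_nodes edges
      = get_incoming_neighbour_positions_alt node ordered_nodes edges := by
  simp only [get_incoming_neighbour_positions, get_incoming_neighbour_positions_alt, get_edges,
    if_true]
  simp only [PySem.List.foldl_append_if_eq_filter, PySem.List.foldl_append_if,
    PySem.List.foldl_append_eq_flatMap, List.nil_append]
  set l := PySem.List.enumerate ordered_nodes with hl
  set S : PySem.Set String := PySem.Set.ofList ((edges.filter (fun e => e.2 == node)).map (fun e => e.1)) with hS
  set L : List Int := (l.filter (fun p => S.contains p.2)).map (fun p => p.1) with hL
  have hget : (fun nb => ((l.foldl (fun d p => d.modify p.2 ([] : List Int) (fun v => v ++ [p.1])) PySem.Dict.empty).getD nb []))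
      = (fun nb => (l.filter (fun p => p.2 == nb)).map (fun p => p.1)) := by
    funext nb; rw [pv_getD_group]; simp
  rw [hget]
  have hperm : L.reverse.Perm (S.flatMap (fun nb => (l.filter (fun p => p.2 == nb)).map (fun p => p.1))) :=
    L.reverse_perm.trans (pv_flatMap_perm l S (PySem.Set.nodup_ofList _)).symm
  have hpw : L.reverse.Pairwise (fun a b : Int => b < a) := by
    rw [List.pairwise_reverse, hL]
    exact List.Pairwise.map _ (fun _ _ h => h)
      ((PySem.List.pairwise_lt_enumerate ordered_nodes 0).filter _)
  rw [PySem.List.sorted_rev_eq_of_perm_of_pairwise_gt _ L.reverse (fun x : Int => x) hperm hpw]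
  by_cases hemp : S.length <= 0
  · have hnil : S = [] := List.eq_nil_of_length_eq_zero (by omega)
    rw [if_pos hemp, hL, hnil]
    simp [PySem.Set.contains]
  · rw [if_neg hemp]

-- ===== VERDICT (by name: the statement is the Claim_ definition above) =====
theorem get_incoming_neighbour_positions_spec : Claim_equal_get_incoming_neighbour_positions := by
  intro node ordered_nodes edges _
  exact pv_main_eq node ordered_nodes edges
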